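-- pv_equiv track=rewrite | github.com/scout719/adventOfCode | 2018/adventOfCode.py | day2_letter_difference
-- ===== SOURCE A (Python) =====
-- def day2_letter_difference(box1, box2):
--     if len(box1) != len(box2):
--         raise ValueError("Boxes with different lengths: {0} & {1}".format(box1, box2))
--     counter_diff = 0
--     common_letters = ""
--     for i, _ in enumerate(box1):
--         if box1[i] != box2[i]:
--             counter_diff += 1
--         else:
--             common_letters += box1[i]
--     return (counter_diff, common_letters)
-- ===== SOURCE B (Python) =====
-- def day2_letter_difference(box1, box2):
--     if len(box1) != len(box2):
--         raise ValueError("Boxes with different lengths: {0} & {1}".format(box1, box2))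
--
--     def solve(lo, hi):
--         # divide and conquer on the index interval [lo, hi)
--         if hi - lo == 0:
--             return (0, "")
--         if hi - lo == 1:
--             if box1[lo] == box2[lo]:
--                 return (0, box1[lo])
--             return (1, "")
--         mid = (lo + hi) // 2
--         d1, c1 = solve(lo, mid)
--         d2, c2 = solve(mid, hi)
--         return (d1 + d2, c1 + c2)
--
--     return solve(0, len(box1))
-- ===== Notes on version B (the rewrite author's own statement) =====
-- stated objective: alternative
-- what changed: B replaces A's linear indexed loop with explicit counter/string accumulators by a divide-and-conquer recursion that splits the index interval in half, solves each half independently and combines the two (count, common) results by addition/concatenation.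
import Mathlib
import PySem

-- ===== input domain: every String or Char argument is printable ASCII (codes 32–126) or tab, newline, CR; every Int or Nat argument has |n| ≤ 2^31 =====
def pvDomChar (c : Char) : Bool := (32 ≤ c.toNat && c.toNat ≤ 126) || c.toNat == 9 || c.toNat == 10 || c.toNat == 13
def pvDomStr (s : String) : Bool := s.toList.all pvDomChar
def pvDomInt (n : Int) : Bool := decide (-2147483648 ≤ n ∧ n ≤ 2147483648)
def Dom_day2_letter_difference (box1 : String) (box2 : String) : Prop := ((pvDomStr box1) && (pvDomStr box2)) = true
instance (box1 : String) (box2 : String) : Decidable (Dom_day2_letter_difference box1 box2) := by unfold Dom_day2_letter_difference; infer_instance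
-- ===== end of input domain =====

-- B keeps A's length guard (as Pre_) but replaces A's linear counted loop by a
-- divide-and-conquer recursion on the index interval, combining half results.

-- ===== PORT A =====
-- one loop step: compare box1[i] and box2[i] (indices produced by the loop are in range,
-- so the `none` fallback is unreachable on Pre_)
def pvStepA (l1 l2 : List Char) (st : Int × List Char) (i : Nat) : Int × List Char :=
  match l1[i]?, l2[i]? with
  | some c1, some c2 => if !(c1 == c2) then (st.1 + 1, st.2) else (st.1, st.2 ++ [c1])
  | _, _ => st

def day2_letter_difference (box1 : String) (box2 : String) : Int × String :=
  -- if len(box1) != len(box2): raise ValueError  → excluded by Pre_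
  ((((List.range box1.toList.length).foldl (pvStepA box1.toList box2.toList) (0, [])).1 : Int),
   String.ofList (((List.range box1.toList.length).foldl (pvStepA box1.toList box2.toList) (0, [])).2))

-- ===== PORT B =====
-- solve(lo, hi): divide and conquer on the index interval [lo, hi); the extra fuel
-- argument (≥ interval length) only makes the recursion structural, it never runs out
def pvSolve (l1 l2 : List Char) : Nat → Nat → Nat → Int × List Char
  | 0, _, _ => (0, [])   -- fuel exhausted: unreachable when fuel ≥ hi - lo
  | fuel + 1, lo, hi =>
    if hi - lo = 0 then (0, [])
    else if hi - lo = 1 then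
      match l1[lo]?, l2[lo]? with
      | some a, some b => if a == b then (0, [a]) else (1, [])
      | _, _ => (1, [])   -- unreachable: lo < length on Pre_
    else
      let mid := (lo + hi) / 2   -- (lo+hi)//2: Nat division = Python floordiv on non-negatives
      let r1 := pvSolve l1 l2 fuel lo mid
      let r2 := pvSolve l1 l2 fuel mid hi
      (r1.1 + r2.1, r1.2 ++ r2.2)

def day2_letter_difference_alt (box1 : String) (box2 : String) : Int × String :=
  -- same guard (raises outside Pre_); return solve(0, len(box1))
  let r := pvSolve box1.toList box2.toList box1.toList.length 0 box1.toList.length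
  (r.1, String.ofList r.2)

-- ===== PRECONDITION & SPEC =====
-- Pre_ excludes exactly the inputs of unequal length, on which Python A (and B) raise ValueError.
def Pre_day2_letter_difference (box1 : String) (box2 : String) : Prop :=
  box1.toList.length = box2.toList.length
instance (box1 : String) (box2 : String) : Decidable (Pre_day2_letter_difference box1 box2) := by
  unfold Pre_day2_letter_difference; infer_instance

def pvWitness_day2_letter_difference : String × String := ("abc", "abd")

def Spec_day2_letter_difference (box1 : String) (box2 : String) (out : Int × String) : Prop := out = day2_letter_difference_alt box1 box2
instance (box1 : String) (box2 : String) (out : Int × String) : Decidable (Spec_day2_letter_difference box1 box2 out) := by unfold Spec_day2_letter_difference; infer_instance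

-- ===== CLAIM (what is proved, stated in full; the proofs are below) =====
def Claim_equal_day2_letter_difference : Prop := ∀ (box1 : String) (box2 : String), Dom_day2_letter_difference box1 box2 → Pre_day2_letter_difference box1 box2 → Spec_day2_letter_difference box1 box2 (day2_letter_difference box1 box2)

-- ===== LEMMAS AND PROOFS =====

-- common characterization: counts/matches over a segment of the zipped lists
def pvChar (s : List (Char × Char)) : Int × List Char :=
  (((s.filter (fun p => !(p.1 == p.2))).length : Int),
   (s.filter (fun p => p.1 == p.2)).map Prod.fst)

lemma pv_loopA (l1 l2 r1 r2 : List Char) (s : Nat)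
    (h1 : l1.drop s = r1) (h2 : l2.drop s = r2) (hlen : r1.length = r2.length)
    (c : Int) (acc : List Char) :
    (List.range' s r1.length).foldl (pvStepA l1 l2) (c, acc)
      = (c + ((r1.zip r2).filter (fun p => !(p.1 == p.2))).length,
         acc ++ ((r1.zip r2).filter (fun p => p.1 == p.2)).map Prod.fst) := by
  induction r1 generalizing r2 s c acc with
  | nil =>
    cases r2 with
    | nil => simp
    | cons y ys => simp at hlen
  | cons x xs ih =>
    cases r2 with
    | nil => simp at hlen
    | cons y ys =>
      have hx1 : l1[s]? = some x := by
        have h := congrArg (fun l => l[0]?) h1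
        simpa [List.getElem?_drop] using h
      have hx2 : l2[s]? = some y := by
        have h := congrArg (fun l => l[0]?) h2
        simpa [List.getElem?_drop] using h
      have hd1 : l1.drop (s + 1) = xs := by
        have : (l1.drop s).drop 1 = xs := by simp [h1]
        simpa [List.drop_drop, Nat.add_comm] using this
      have hd2 : l2.drop (s + 1) = ys := by
        have : (l2.drop s).drop 1 = ys := by simp [h2]
        simpa [List.drop_drop, Nat.add_comm] using this
      have hlen' : xs.length = ys.length := by simpa using hlen
      simp only [List.length_cons, List.range', List.foldl_cons]
      by_cases hxy : (x == y) = true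
      · rw [show pvStepA l1 l2 (c, acc) s = (c, acc ++ [x]) by
              simp [pvStepA, hx1, hx2, hxy]]
        rw [ih ys (s + 1) hd1 hd2 hlen' c (acc ++ [x])]
        simp [List.zip_cons_cons, hxy]
      · rw [show pvStepA l1 l2 (c, acc) s = (c + 1, acc) by
              simp [pvStepA, hx1, hx2, hxy]]
        rw [ih ys (s + 1) hd1 hd2 hlen' (c + 1) acc]
        have : (x == y) = false := by simpa using hxy
        simp [List.zip_cons_cons, this]
        omega

lemma pv_solveB_aux (l1 l2 : List Char) (hlen : l1.length = l2.length) (fuel : Nat) :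
    ∀ lo hi : Nat, hi - lo ≤ fuel → lo ≤ hi → hi ≤ l1.length →
      pvSolve l1 l2 fuel lo hi = pvChar (((l1.zip l2).drop lo).take (hi - lo)) := by
  induction fuel with
  | zero =>
    intro lo hi hn hlo hhi
    have h0 : hi - lo = 0 := by omega
    simp [pvSolve, h0, pvChar]
  | succ fuel ih =>
    intro lo hi hn hlo hhi
    rw [pvSolve]
    by_cases h0 : hi - lo = 0
    · simp [h0, pvChar]
    · by_cases h1 : hi - lo = 1
      · have hlolt : lo < l1.length := by omega
        have hx1 : l1[lo]? = some (l1[lo]) := List.getElem?_eq_getElem hlolt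
        have hx2 : l2[lo]? = some (l2[lo]'(by omega)) := List.getElem?_eq_getElem (by omega)
        have hseg : ((l1.zip l2).drop lo).take (hi - lo) = [(l1[lo], l2[lo]'(by omega))] := by
          rw [h1]
          have hd : (l1.zip l2).drop lo
              = (l1[lo], l2[lo]'(by omega)) :: (l1.zip l2).drop (lo + 1) := by
            rw [List.drop_eq_getElem_cons (by simp [List.length_zip]; omega)]
            simp [List.getElem_zip]
          rw [hd]; simp
        rw [hseg]
        simp only [h1, if_true, hx1, hx2]
        by_cases hab : (l1[lo] == l2[lo]'(by omega)) = true
        · simp [hab, pvChar]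
        · have hab' : (l1[lo] == l2[lo]'(by omega)) = false := by simpa using hab
          simp [hab', pvChar]
      · simp only [h0, h1, reduceIte]
        rw [ih lo ((lo + hi) / 2) (by omega) (by omega) (by omega),
            ih ((lo + hi) / 2) hi (by omega) (by omega) hhi]
        have hsplit : ((l1.zip l2).drop lo).take (hi - lo)
            = ((l1.zip l2).drop lo).take ((lo + hi) / 2 - lo)
              ++ ((l1.zip l2).drop ((lo + hi) / 2)).take (hi - (lo + hi) / 2) := by
          have h := List.take_add (l := (l1.zip l2).drop lo)
            (i := (lo + hi) / 2 - lo) (j := hi - (lo + hi) / 2)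
          have hd : ((l1.zip l2).drop lo).drop ((lo + hi) / 2 - lo)
              = (l1.zip l2).drop ((lo + hi) / 2) := by
            rw [List.drop_drop]
            congr 1
            omega
          rw [show hi - lo = ((lo + hi) / 2 - lo) + (hi - (lo + hi) / 2) by omega, h, hd]
        rw [hsplit]
        simp [pvChar, List.filter_append]

lemma pv_solveB (l1 l2 : List Char) (hlen : l1.length = l2.length) (fuel lo hi : Nat)
    (hfuel : hi - lo ≤ fuel) (hlo : lo ≤ hi) (hhi : hi ≤ l1.length) :
    pvSolve l1 l2 fuel lo hi = pvChar (((l1.zip l2).drop lo).take (hi - lo)) :=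
  pv_solveB_aux l1 l2 hlen fuel lo hi hfuel hlo hhi

-- ===== VERDICT (by name: the statement is the Claim_ definition above) =====
theorem day2_letter_difference_spec : Claim_equal_day2_letter_difference := by
  intro box1 box2 _hdom hpre
  unfold Spec_day2_letter_difference day2_letter_difference day2_letter_difference_alt
  have hpre' : box1.toList.length = box2.toList.length := hpre
  have hzlen : (box1.toList.zip box2.toList).length = box1.toList.length := by
    simp [List.length_zip, hpre']
  rw [List.range_eq_range',
    pv_loopA box1.toList box2.toList box1.toList box2.toList 0 (by simp) (by simp) hpre' 0 [],
    pv_solveB box1.toList box2.toList hpre' box1.toList.length 0 box1.toList.length (by omega) (by omega) (by omega)]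
  have htake : List.take box1.length (box1.toList.zip box2.toList) = box1.toList.zip box2.toList :=
    List.take_of_length_le (by simp [hzlen])
  simp [pvChar, htake]
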